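-- pv_equiv track=rewrite | github.com/liuz138/Align_benchmark | scripts/gen_seq_score_sam.py | compute_sam_cigar
-- ===== SOURCE A (Python) =====
-- def compute_sam_cigar(ref_seq, query_seq):
--     sam_cigar = []
--     M, I, D = 0, 0, 0
--     for i in range(len(ref_seq)):
--         ref_char = ref_seq[i]
--         query_char = query_seq[i]
--
--         if ref_char != '-' and query_char != '-':
--             if I > 0 or D > 0:
--                 flush_sam_counts(sam_cigar, M, I, D)
--                 M, I, D = 0, 0, 0
--             M += 1
--         elif ref_char == '-' and query_char != '-':
--             if M > 0 or D > 0: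
--                 flush_sam_counts(sam_cigar, M, I, D)
--                 M, I, D = 0, 0, 0
--             I += 1
--         elif query_char == '-' and ref_char != '-':
--             if M > 0 or I > 0 :
--                 flush_sam_counts(sam_cigar, M, I, D)
--                 M, I, D = 0, 0, 0
--             D += 1
--
--     flush_sam_counts(sam_cigar, M, I, D)
--     return ''.join(sam_cigar)
--
-- def flush_sam_counts(sam_cigar, M, I, D):
--     if M > 0:
--         sam_cigar.append(f'{M}M')
--     if I > 0:
--         sam_cigar.append(f'{I}I')
--     if D > 0:
--         sam_cigar.append(f'{D}D')
-- ===== SOURCE B (Python) =====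
-- from itertools import groupby
--
-- def compute_sam_cigar(ref_seq, query_seq):
--     ops = []
--     for i in range(len(ref_seq)):
--         r = ref_seq[i]
--         q = query_seq[i]
--         if r != '-' and q != '-':
--             ops.append('M')
--         elif r == '-' and q != '-':
--             ops.append('I')
--         elif q == '-' and r != '-':
--             ops.append('D')
--     return ''.join(f'{sum(1 for _ in g)}{op}' for op, g in groupby(ops))
-- ===== Notes on version B (the rewrite author's own statement) =====
-- stated objective: alternative
-- what changed: B splits the work into two passes: classify each position into an op character M/I/D (skipping double gaps), then run-length-encode the op list with itertools.groupby, removing A's manual counter/flush state machine.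
import Mathlib
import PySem

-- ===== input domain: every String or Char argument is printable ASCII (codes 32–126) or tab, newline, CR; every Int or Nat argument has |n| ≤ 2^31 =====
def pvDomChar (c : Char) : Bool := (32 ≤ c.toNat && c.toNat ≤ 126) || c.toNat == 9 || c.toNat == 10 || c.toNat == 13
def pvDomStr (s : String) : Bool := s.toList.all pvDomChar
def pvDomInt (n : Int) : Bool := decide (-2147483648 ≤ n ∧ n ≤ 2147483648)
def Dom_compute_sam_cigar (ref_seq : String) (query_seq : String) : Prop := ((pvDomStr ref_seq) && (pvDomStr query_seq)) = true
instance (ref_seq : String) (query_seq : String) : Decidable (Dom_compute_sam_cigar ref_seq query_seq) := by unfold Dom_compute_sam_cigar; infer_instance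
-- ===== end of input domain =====

-- B replaces A's counter/flush state machine by a two-pass classify-then-run-length-encode decomposition (alternative, same cost).


-- ===== PORT A =====
-- flush_sam_counts: appends f'{M}M', f'{I}I', f'{D}D' for the positive counters
def flush_sam_counts (cig : List String) (M I D : Int) : List String :=
  let c1 := if M > 0 then cig ++ [PySem.Int.toStr M ++ "M"] else cig
  let c2 := if I > 0 then c1 ++ [PySem.Int.toStr I ++ "I"] else c1
  if D > 0 then c2 ++ [PySem.Int.toStr D ++ "D"] else c2

-- the loop 'for i in range(len(ref_seq))', indexing both strings in lockstep;
-- if query_seq runs out first Python raises IndexError (excluded by Pre_), here we stop.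
def aLoop : List Char → List Char → List String → Int → Int → Int → List String × Int × Int × Int
  | [], _, cig, M, I, D => (cig, M, I, D)
  | _ :: _, [], cig, M, I, D => (cig, M, I, D)
  | r :: rs, q :: qs, cig, M, I, D =>
    if r ≠ '-' ∧ q ≠ '-' then
      let s := if I > 0 ∨ D > 0 then (flush_sam_counts cig M I D, (0:Int), (0:Int), (0:Int)) else (cig, M, I, D)
      aLoop rs qs s.1 (s.2.1 + 1) s.2.2.1 s.2.2.2
    else if r = '-' ∧ q ≠ '-' then
      let s := if M > 0 ∨ D > 0 then (flush_sam_counts cig M I D, (0:Int), (0:Int), (0:Int)) else (cig, M, I, D)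
      aLoop rs qs s.1 s.2.1 (s.2.2.1 + 1) s.2.2.2
    else if q = '-' ∧ r ≠ '-' then
      let s := if M > 0 ∨ I > 0 then (flush_sam_counts cig M I D, (0:Int), (0:Int), (0:Int)) else (cig, M, I, D)
      aLoop rs qs s.1 s.2.1 s.2.2.1 (s.2.2.2 + 1)
    else
      aLoop rs qs cig M I D

def compute_sam_cigar (ref_seq : String) (query_seq : String) : String :=
  let s := aLoop ref_seq.toList query_seq.toList [] 0 0 0
  String.join (flush_sam_counts s.1 s.2.1 s.2.2.1 s.2.2.2)

-- ===== PORT B =====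
-- first pass: classify each position into an op char, skipping double gaps
def bClassify : List Char → List Char → List Char
  | [], _ => []
  | _ :: _, [] => []
  | r :: rs, q :: qs =>
    if r ≠ '-' ∧ q ≠ '-' then 'M' :: bClassify rs qs
    else if r = '-' ∧ q ≠ '-' then 'I' :: bClassify rs qs
    else if q = '-' ∧ r ≠ '-' then 'D' :: bClassify rs qs
    else bClassify rs qs

-- second pass: run-length encoding (itertools.groupby)
def bRle : Char → Int → List Char → List String
  | op, n, [] => [PySem.Int.toStr n ++ op.toString]
  | op, n, c :: cs =>
    if c = op then bRle op (n + 1) cs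
    else (PySem.Int.toStr n ++ op.toString) :: bRle c 1 cs

def bEncode : List Char → List String
  | [] => []
  | c :: cs => bRle c 1 cs

def compute_sam_cigar_alt (ref_seq : String) (query_seq : String) : String :=
  String.join (bEncode (bClassify ref_seq.toList query_seq.toList))

-- ===== PRECONDITION & SPEC =====
-- Pre_ excludes exactly the inputs where query_seq is shorter than ref_seq, on which
-- the Python A raises IndexError (query_seq[i] out of range); it excludes nothing A returns on.
def Pre_compute_sam_cigar (ref_seq : String) (query_seq : String) : Prop :=
  ref_seq.toList.length ≤ query_seq.toList.length
instance (ref_seq : String) (query_seq : String) : Decidable (Pre_compute_sam_cigar ref_seq query_seq) := by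
  unfold Pre_compute_sam_cigar; infer_instance

def pvWitness_compute_sam_cigar : String × String := ("AC-G", "A-CG")

def Spec_compute_sam_cigar (ref_seq : String) (query_seq : String) (out : String) : Prop := out = compute_sam_cigar_alt ref_seq query_seq
instance (ref_seq : String) (query_seq : String) (out : String) : Decidable (Spec_compute_sam_cigar ref_seq query_seq out) := by unfold Spec_compute_sam_cigar; infer_instance

-- ===== CLAIM (what is proved, stated in full; the proofs are below) =====
def Claim_equal_compute_sam_cigar : Prop := ∀ (ref_seq : String) (query_seq : String), Dom_compute_sam_cigar ref_seq query_seq → Pre_compute_sam_cigar ref_seq query_seq → Spec_compute_sam_cigar ref_seq query_seq (compute_sam_cigar ref_seq query_seq)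

-- ===== LEMMAS AND PROOFS =====

-- the one-positive-counter state A's loop keeps while inside a run of op repeated n times
def ctM (op : Char) (n : Int) : Int := if op = 'M' then n else 0
def ctI (op : Char) (n : Int) : Int := if op = 'I' then n else 0
def ctD (op : Char) (n : Int) : Int := if op = 'D' then n else 0

-- the final flushed list, i.e. what A's function builds after the loop
def aFinish (rs qs : List Char) (cig : List String) (M I D : Int) : List String :=
  let s := aLoop rs qs cig M I D
  flush_sam_counts s.1 s.2.1 s.2.2.1 s.2.2.2

lemma flush_st (cig : List String) (op : Char) (n : Int) (hn : 0 < n)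
    (hop : op = 'M' ∨ op = 'I' ∨ op = 'D') :
    flush_sam_counts cig (ctM op n) (ctI op n) (ctD op n)
      = cig ++ [PySem.Int.toStr n ++ op.toString] := by
  rcases hop with h | h | h <;> subst h <;>
    simp [flush_sam_counts, ctM, ctI, ctD, hn] <;> rfl

lemma aFinish_run (rs : List Char) : ∀ (qs : List Char) (cig : List String) (op : Char) (n : Int),
    0 < n → (op = 'M' ∨ op = 'I' ∨ op = 'D') →
    aFinish rs qs cig (ctM op n) (ctI op n) (ctD op n)
      = cig ++ bRle op n (bClassify rs qs) := by
  induction rs with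
  | nil =>
    intro qs cig op n hn hop
    simp [aFinish, aLoop, bClassify, bRle, flush_st cig op n hn hop]
  | cons r rs ih =>
    intro qs cig op n hn hop
    cases qs with
    | nil =>
      simp [aFinish, aLoop, bClassify, bRle, flush_st cig op n hn hop]
    | cons q qs =>
      by_cases hr : r = '-' <;> by_cases hq : q = '-'
      · -- double gap: skipped on both sides
        simp only [aFinish, aLoop, bClassify, hr, hq]
        simp only [aFinish] at ih
        simpa using ih qs cig op n hn hop
      · -- insertion position: op char 'I'
        rcases hop with h | h | h <;> subst h
        · have hfl := flush_st cig 'M' n hn (Or.inl rfl)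
          simp [ctM, ctI, ctD] at hfl
          have h2 := ih qs (cig ++ [PySem.Int.toStr n ++ ('M').toString]) 'I' 1 one_pos (Or.inr (Or.inl rfl))
          simp [aFinish, ctM, ctI, ctD] at h2
          simp [aFinish, aLoop, bClassify, bRle, hr, hq, hn, ctM, ctI, ctD, hfl, h2]
        · have h2 := ih qs cig 'I' (n + 1) (by omega) (Or.inr (Or.inl rfl))
          simp [aFinish, ctM, ctI, ctD] at h2
          simp [aFinish, aLoop, bClassify, bRle, hr, hq, ctM, ctI, ctD, h2]
        · have hfl := flush_st cig 'D' n hn (Or.inr (Or.inr rfl))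
          simp [ctM, ctI, ctD] at hfl
          have h2 := ih qs (cig ++ [PySem.Int.toStr n ++ ('D').toString]) 'I' 1 one_pos (Or.inr (Or.inl rfl))
          simp [aFinish, ctM, ctI, ctD] at h2
          simp [aFinish, aLoop, bClassify, bRle, hr, hq, hn, ctM, ctI, ctD, hfl, h2]
      · -- deletion position: op char 'D'
        rcases hop with h | h | h <;> subst h
        · have hfl := flush_st cig 'M' n hn (Or.inl rfl)
          simp [ctM, ctI, ctD] at hfl
          have h2 := ih qs (cig ++ [PySem.Int.toStr n ++ ('M').toString]) 'D' 1 one_pos (Or.inr (Or.inr rfl))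
          simp [aFinish, ctM, ctI, ctD] at h2
          simp [aFinish, aLoop, bClassify, bRle, hr, hq, hn, ctM, ctI, ctD, hfl, h2]
        · have hfl := flush_st cig 'I' n hn (Or.inr (Or.inl rfl))
          simp [ctM, ctI, ctD] at hfl
          have h2 := ih qs (cig ++ [PySem.Int.toStr n ++ ('I').toString]) 'D' 1 one_pos (Or.inr (Or.inr rfl))
          simp [aFinish, ctM, ctI, ctD] at h2
          simp [aFinish, aLoop, bClassify, bRle, hr, hq, hn, ctM, ctI, ctD, hfl, h2]
        · have h2 := ih qs cig 'D' (n + 1) (by omega) (Or.inr (Or.inr rfl))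
          simp [aFinish, ctM, ctI, ctD] at h2
          simp [aFinish, aLoop, bClassify, bRle, hr, hq, ctM, ctI, ctD, h2]
      · -- match position: op char 'M'
        rcases hop with h | h | h <;> subst h
        · have h2 := ih qs cig 'M' (n + 1) (by omega) (Or.inl rfl)
          simp [aFinish, ctM, ctI, ctD] at h2
          simp [aFinish, aLoop, bClassify, bRle, hr, hq, ctM, ctI, ctD, h2]
        · have hfl := flush_st cig 'I' n hn (Or.inr (Or.inl rfl))
          simp [ctM, ctI, ctD] at hfl
          have h2 := ih qs (cig ++ [PySem.Int.toStr n ++ ('I').toString]) 'M' 1 one_pos (Or.inl rfl)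
          simp [aFinish, ctM, ctI, ctD] at h2
          simp [aFinish, aLoop, bClassify, bRle, hr, hq, hn, ctM, ctI, ctD, hfl, h2]
        · have hfl := flush_st cig 'D' n hn (Or.inr (Or.inr rfl))
          simp [ctM, ctI, ctD] at hfl
          have h2 := ih qs (cig ++ [PySem.Int.toStr n ++ ('D').toString]) 'M' 1 one_pos (Or.inl rfl)
          simp [aFinish, ctM, ctI, ctD] at h2
          simp [aFinish, aLoop, bClassify, bRle, hr, hq, hn, ctM, ctI, ctD, hfl, h2]

lemma aFinish_zero (rs : List Char) : ∀ (qs : List Char),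
    aFinish rs qs [] 0 0 0 = bEncode (bClassify rs qs) := by
  induction rs with
  | nil => intro qs; simp [aFinish, aLoop, flush_sam_counts, bClassify, bEncode]
  | cons r rs ih =>
    intro qs
    cases qs with
    | nil => simp [aFinish, aLoop, flush_sam_counts, bClassify, bEncode]
    | cons q qs =>
      by_cases hr : r = '-' <;> by_cases hq : q = '-'
      · simp only [aFinish, aLoop, bClassify, hr, hq]
        simp only [aFinish] at ih
        simpa using ih qs
      · have := aFinish_run rs qs [] 'I' 1 one_pos (Or.inr (Or.inl rfl))
        simp [aFinish, ctM, ctI, ctD] at this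
        simp [aFinish, aLoop, bClassify, bEncode, hr, hq, this]
      · have := aFinish_run rs qs [] 'D' 1 one_pos (Or.inr (Or.inr rfl))
        simp [aFinish, ctM, ctI, ctD] at this
        simp [aFinish, aLoop, bClassify, bEncode, hr, hq, this]
      · have := aFinish_run rs qs [] 'M' 1 one_pos (Or.inl rfl)
        simp [aFinish, ctM, ctI, ctD] at this
        simp [aFinish, aLoop, bClassify, bEncode, hr, hq, this]

-- ===== VERDICT (by name: the statement is the Claim_ definition above) =====
theorem compute_sam_cigar_spec : Claim_equal_compute_sam_cigar := by
  intro ref_seq query_seq _ _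
  unfold Spec_compute_sam_cigar compute_sam_cigar compute_sam_cigar_alt
  have h := aFinish_zero ref_seq.toList query_seq.toList
  simp only [aFinish] at h
  exact congrArg String.join h
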